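-- pv_equiv track=rewrite | github.com/akashanup/programming | LexicographicallySmallestStringFormedByAppendingCharacterFromTheFirstK-CharactersOfGivenString/solution.py | smallestString
-- ===== SOURCE A (Python) =====
-- def smallestString(str, k):
--     result = ''
--     while str:
--         smallest = 0
--         i = 1
--         while i < k and i < len(str):
--             if str[smallest] >= str[i]:
--                 smallest = i
--             i += 1
--         result += str[smallest]
--         str = str[:smallest] + str[smallest + 1:]
--     return result
-- ===== SOURCE B (Python) =====
-- def smallestString(str, k):
--     # Bucket/counting window: counts of the first min(k, n) active chars; each step
--     # emit the smallest char present and slide the window by one original char.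
--     if k <= 0:
--         return str
--     n = len(str)
--     w = k if k < n else n
--     counts = [0] * 128
--     for i in range(w):
--         counts[ord(str[i])] += 1
--     p = w
--     out = []
--     for _ in range(n):
--         c = 0
--         while counts[c] == 0:
--             c += 1
--         counts[c] -= 1
--         out.append(chr(c))
--         if p < n:
--             counts[ord(str[p])] += 1
--             p += 1
--     return ''.join(out)
-- ===== Notes on version B (the rewrite author's own statement) =====
-- stated objective: faster
-- what changed: A repeatedly rescans the first k chars for the rightmost minimum and rebuilds the string by slicing (O(n*k) with O(n) slices); B slides a 128-bucket character histogram of the active window over the string once, emitting the smallest bucketed char each step (the tie-break choice provably never changes the output), giving O(n*128) with no slicing.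
import Mathlib
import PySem

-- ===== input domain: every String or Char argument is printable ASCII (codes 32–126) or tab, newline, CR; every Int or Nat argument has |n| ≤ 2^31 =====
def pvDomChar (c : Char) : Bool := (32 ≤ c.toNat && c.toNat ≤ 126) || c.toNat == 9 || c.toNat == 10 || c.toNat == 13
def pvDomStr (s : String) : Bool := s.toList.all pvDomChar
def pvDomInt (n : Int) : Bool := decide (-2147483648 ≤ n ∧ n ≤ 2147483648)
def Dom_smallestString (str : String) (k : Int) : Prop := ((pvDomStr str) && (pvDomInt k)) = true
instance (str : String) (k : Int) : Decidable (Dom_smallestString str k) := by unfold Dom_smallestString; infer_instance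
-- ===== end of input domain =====

-- B replaces A's quadratic rescan-and-reslice greedy by a 128-entry counting window
-- slid once over the string (objective: faster; the tie-break choice provably cannot
-- change the output, so only counts are needed).

-- ===== PORT A =====
-- inner while loop of A: 'while i < k and i < len(str): if str[smallest] >= str[i]: smallest = i'
def pvAInner (s : List Char) (k : Int) (smallest i : Nat) : Nat :=
  if h : (i : Int) < k ∧ i < s.length then
    pvAInner s k (if PySem.List.pyGetD s (i : Int) ' ' ≤ PySem.List.pyGetD s (smallest : Int) ' ' then i else smallest) (i + 1)
  else smallest
termination_by s.length - i
decreasing_by omega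

theorem pvAInner_lt (s : List Char) (k : Int) :
    ∀ i smallest, smallest < s.length → pvAInner s k smallest i < s.length := by
  intro i
  induction' hn : s.length - i using Nat.strong_induction_on with m ih generalizing i
  intro smallest hs
  rw [pvAInner]
  split
  · rename_i h
    exact ih (s.length - (i+1)) (by omega) (i+1) rfl _ (by split <;> omega)
  · exact hs

-- outer while loop of A; 'result' is accumulated as a list of chars
def pvALoop (s : List Char) (k : Int) (result : List Char) : List Char :=
  if _hs : s = [] then result
  else
    let smallest := pvAInner s k 0 1
    pvALoop (PySem.List.slice s none (some (smallest : Int)) ++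
             PySem.List.slice s (some ((smallest : Int) + 1)) none) k
      (result ++ [PySem.List.pyGetD s (smallest : Int) ' '])
termination_by s.length
decreasing_by
  have h1 : pvAInner s k 0 1 < s.length :=
    pvAInner_lt s k 1 0 (by cases s <;> simp_all)
  rw [PySem.List.slice_to_natCast, PySem.List.slice_from s (by omega)]
  simp
  omega

def smallestString (str : String) (k : Int) : String :=
  String.ofList (pvALoop str.toList k [])

-- ===== PORT B =====
-- 'while counts[c] == 0: c += 1' of Source B; fuel 128 - c. The 'else' branch is the
-- IndexError case of the Python, unreachable for every input (the window is never
-- empty while the outer loop runs).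
def pvBFind (counts : List Int) (c : Nat) : Nat :=
  if _h : c < 128 then
    if PySem.List.pyGetD counts (c : Int) 0 = 0 then pvBFind counts (c + 1) else c
  else c
termination_by 128 - c
decreasing_by omega

-- one iteration of Source B's 'for _ in range(n)' over the state (counts, p, out)
def pvBStep (s : List Char) (n : Nat) (st : List Int × Nat × List Char) :
    List Int × Nat × List Char :=
  let c := pvBFind st.1 0
  let counts := PySem.List.pySetD st.1 (c : Int) (PySem.List.pyGetD st.1 (c : Int) 0 - 1)
  let out := st.2.2 ++ [Char.ofNat c]
  if st.2.1 < n then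
    (PySem.List.pySetD counts ((s.getD st.2.1 ' ').toNat : Int)
       (PySem.List.pyGetD counts ((s.getD st.2.1 ' ').toNat : Int) 0 + 1), st.2.1 + 1, out)
  else (counts, st.2.1, out)

def smallestString_alt (str : String) (k : Int) : String :=
  if k ≤ 0 then str
  else
    let s := str.toList
    let n := s.length
    let w := if k < (n : Int) then k.toNat else n
    let counts0 := (List.range w).foldl
      (fun cnts i => PySem.List.pySetD cnts ((s.getD i ' ').toNat : Int)
        (PySem.List.pyGetD cnts ((s.getD i ' ').toNat : Int) 0 + 1))
      (List.replicate 128 0)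
    String.ofList (((List.range n).foldl (fun st _ => pvBStep s n st) (counts0, w, [])).2.2)

-- ===== PRECONDITION & SPEC =====
def Spec_smallestString (str : String) (k : Int) (out : String) : Prop := out = smallestString_alt str k
instance (str : String) (k : Int) (out : String) : Decidable (Spec_smallestString str k out) := by unfold Spec_smallestString; infer_instance

-- ===== CLAIM (what is proved, stated in full; the proofs are below) =====
def Claim_equal_smallestString : Prop := ∀ (str : String) (k : Int), Dom_smallestString str k → Spec_smallestString str k (smallestString str k)

-- ===== LEMMAS AND PROOFS =====

-- counts is the 128-bucket histogram of the window ws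
def pvCounts (counts : List Int) (ws : List Char) : Prop :=
  counts.length = 128 ∧
    ∀ c : Nat, c < 128 → counts.getD c 0 = (ws.countP (fun x => x.toNat == c) : Int)

theorem pv_getD_set (l : List Int) (a : Nat) (v : Int) (m : Nat) (ha : a < l.length) :
    (l.set a v).getD m 0 = if m = a then v else l.getD m 0 := by
  by_cases h : m = a
  · subst h; simp [List.getD_eq_getElem?_getD, ha]
  · have h' : a ≠ m := fun hh => h hh.symm
    simp [List.getD_eq_getElem?_getD, h, h']

theorem pv_char_le_iff (a b : Char) : a ≤ b ↔ a.toNat ≤ b.toNat := by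
  simp [Char.le_def, UInt32.le_iff_toNat_le]

-- histogram update: append one char to the window
theorem pvCounts_inc (counts : List Int) (ws : List Char) (x : Char)
    (h : pvCounts counts ws) (hx : x.toNat < 128) :
    pvCounts (counts.set x.toNat (counts.getD x.toNat 0 + 1)) (ws ++ [x]) := by
  obtain ⟨hlen, hc⟩ := h
  refine ⟨by simp [hlen], ?_⟩
  intro c hcl
  rw [pv_getD_set _ _ _ _ (by omega), List.countP_append]
  by_cases hce : c = x.toNat
  · subst hce
    rw [if_pos rfl, hc _ hcl]
    have h1 : List.countP (fun y => y.toNat == x.toNat) [x] = 1 := by simp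
    rw [h1]; push_cast; ring
  · have h1 : List.countP (fun y => y.toNat == c) [x] = 0 := by
      simp only [List.countP_cons, List.countP_nil]
      have : (x.toNat == c) = false := by simp; omega
      simp [this]
    rw [if_neg hce, hc _ hcl, h1]; simp

-- histogram update: remove the j-th char of the window
theorem pvCounts_dec (counts : List Int) (ws : List Char) (j : Nat)
    (h : pvCounts counts ws) (hj : j < ws.length) (hx : (ws[j]).toNat < 128) :
    pvCounts (counts.set (ws[j]).toNat (counts.getD (ws[j]).toNat 0 - 1)) (ws.eraseIdx j) := by
  obtain ⟨hlen, hc⟩ := h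
  refine ⟨by simp [hlen], ?_⟩
  intro c hcl
  have hdecomp : ws = ws.take j ++ ws[j] :: ws.drop (j + 1) := by
    conv_lhs => rw [← List.take_append_drop j ws]
    rw [List.drop_eq_getElem_cons hj]
  have hcnt : ws.countP (fun x => x.toNat == c) =
      ((ws.take j).countP (fun x => x.toNat == c) + (ws.drop (j+1)).countP (fun x => x.toNat == c))
        + (if (ws[j]).toNat = c then 1 else 0) := by
    conv_lhs => rw [hdecomp]
    rw [List.countP_append, List.countP_cons]
    by_cases hh : (ws[j]).toNat = c
    · simp [hh]; omega
    · have : ((ws[j]).toNat == c) = false := by simp [hh]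
      simp [this, hh]
  rw [pv_getD_set _ _ _ _ (by omega), List.eraseIdx_eq_take_drop_succ, List.countP_append]
  by_cases hce : c = (ws[j]).toNat
  · subst hce
    rw [if_pos rfl, hc _ hcl, hcnt, if_pos rfl]
    push_cast; ring
  · rw [if_neg hce, hc _ hcl, hcnt, if_neg (fun hh => hce hh.symm)]
    push_cast; ring

theorem pvBFind_spec (counts : List Int) :
    ∀ c0, (∃ c, c0 ≤ c ∧ c < 128 ∧ counts.getD c 0 ≠ 0) →
      c0 ≤ pvBFind counts c0 ∧ pvBFind counts c0 < 128 ∧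
        counts.getD (pvBFind counts c0) 0 ≠ 0 ∧
        ∀ t, c0 ≤ t → t < pvBFind counts c0 → counts.getD t 0 = 0 := by
  intro c0
  induction' hn : 128 - c0 using Nat.strong_induction_on with m ih generalizing c0
  rintro ⟨c, hc0, hcl, hcnz⟩
  rw [pvBFind]
  rw [dif_pos (by omega)]
  by_cases hz : PySem.List.pyGetD counts (c0 : Int) 0 = 0
  · rw [if_pos hz]
    simp only [PySem.List.pyGetD_natCast] at hz
    have hne : c0 ≠ c := fun hh => hcnz (hh ▸ hz)
    have := ih (128 - (c0 + 1)) (by omega) (c0 + 1) rfl ⟨c, by omega, hcl, hcnz⟩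
    refine ⟨by omega, this.2.1, this.2.2.1, ?_⟩
    intro t ht htr
    rcases Nat.eq_or_lt_of_le ht with he | hlt
    · exact he ▸ hz
    · exact this.2.2.2 t hlt htr
  · rw [if_neg hz]
    simp only [PySem.List.pyGetD_natCast] at hz
    exact ⟨le_refl _, by omega, hz, fun t ht htr => absurd htr (by omega)⟩

-- the bucket scan finds exactly the code of the smallest char of the window
theorem pvBFind_min (counts : List Int) (ws : List Char) (mu : Char)
    (h : pvCounts counts ws) (hmem : mu ∈ ws) (hmin : ∀ x ∈ ws, mu ≤ x)
    (hchars : ∀ x ∈ ws, x.toNat < 128) :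
    pvBFind counts 0 = mu.toNat := by
  obtain ⟨hlen, hc⟩ := h
  have hmu : mu.toNat < 128 := hchars _ hmem
  have hnz : counts.getD mu.toNat 0 ≠ 0 := by
    rw [hc _ hmu]
    have : 0 < ws.countP (fun x => x.toNat == mu.toNat) :=
      List.countP_pos_iff.mpr ⟨mu, hmem, by simp⟩
    omega
  obtain ⟨h0, hlt, hrnz, hall⟩ := pvBFind_spec counts 0 ⟨mu.toNat, by omega, hmu, hnz⟩
  set r := pvBFind counts 0 with hr
  have h1 : ¬ mu.toNat < r := fun hh => hnz (hall _ (by omega) hh)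
  have h2 : mu.toNat ≤ r := by
    rw [hc _ hlt] at hrnz
    have : 0 < ws.countP (fun x => x.toNat == r) := by omega
    obtain ⟨x, hxm, hxr⟩ := List.countP_pos_iff.mp this
    have := (pv_char_le_iff mu x).mp (hmin x hxm)
    simp at hxr
    omega
  omega

-- A's inner scan: the selected index is inside the window and holds a minimal char
theorem pvAInner_spec (s : List Char) (k : Int) :
    ∀ (i smallest : Nat), smallest < i → ((smallest : Nat) : Int) < k → smallest < s.length →
      (∀ t, t < i → s.getD smallest ' ' ≤ s.getD t ' ') →
      ((pvAInner s k smallest i : Int) < k ∧ pvAInner s k smallest i < s.length ∧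
        ∀ t : Nat, ((t : Nat) : Int) < k → t < s.length →
          s.getD (pvAInner s k smallest i) ' ' ≤ s.getD t ' ') := by
  intro i
  induction' hn : s.length - i using Nat.strong_induction_on with m ih generalizing i
  intro smallest hsi hsk hsl hmin
  rw [pvAInner]
  split
  · rename_i h
    simp only [PySem.List.pyGetD_natCast]
    refine ih (s.length - (i + 1)) (by omega) (i + 1) rfl _ ?_ ?_ ?_ ?_
    · split <;> omega
    · split
      · exact h.1
      · exact hsk
    · split
      · exact h.2
      · exact hsl
    · intro t ht
      by_cases he : t = i
      · subst he
        split
        · exact le_refl _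
        · rename_i hle; exact le_of_not_ge hle
      · have ht' : t < i := by omega
        split
        · rename_i hle; exact le_trans hle (hmin t ht')
        · exact hmin t ht'
  · rename_i h
    refine ⟨hsk, hsl, ?_⟩
    intro t htk htl
    have : t < i := by omega
    exact hmin t this

-- Source B's main loop as iterated stepping (the range counter is unused)
def pvStepN (s : List Char) (n : Nat) : Nat → List Int × Nat × List Char → List Int × Nat × List Char
  | 0, st => st
  | m + 1, st => pvStepN s n m (pvBStep s n st)

theorem pv_foldl_stepN (s : List Char) (n : Nat) :
    ∀ (l : List Nat) st, l.foldl (fun st _ => pvBStep s n st) st = pvStepN s n l.length st := by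
  intro l
  induction l with
  | nil => intro st; rfl
  | cons a t ih => intro st; simp [List.foldl_cons, pvStepN, ih]

-- the initial histogram of Source B is the histogram of the first w chars
theorem pvCounts_init (s : List Char) (hchars : ∀ x ∈ s, x.toNat < 128) :
    ∀ w, w ≤ s.length →
      pvCounts ((List.range w).foldl
        (fun cnts i => PySem.List.pySetD cnts ((s.getD i ' ').toNat : Int)
          (PySem.List.pyGetD cnts ((s.getD i ' ').toNat : Int) 0 + 1))
        (List.replicate 128 0)) (s.take w) := by
  intro w
  induction w with
  | zero =>
    intro _
    refine ⟨by simp, ?_⟩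
    intro c hcl
    have h0 : (List.replicate 128 (0 : Int))[c]? = some 0 := by
      rw [List.getElem?_replicate]; simp [hcl]
    rw [List.range_zero, List.foldl_nil, List.getD_eq_getElem?_getD, h0]
    simp
  | succ m ih =>
    intro hle
    rw [List.range_succ, List.foldl_append, List.foldl_cons, List.foldl_nil]
    have hm : m < s.length := by omega
    have hget : s.getD m ' ' = s[m] := List.getD_eq_getElem s ' ' hm
    have htake : s.take (m + 1) = s.take m ++ [s[m]] := by
      rw [List.take_add_one]
      simp [List.getElem?_eq_getElem hm]
    rw [htake]
    have ih' := ih (by omega)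
    simp only [PySem.List.pySetD_natCast, PySem.List.pyGetD_natCast] at ih' ⊢
    rw [hget]
    exact pvCounts_inc _ _ _ ih' (hchars _ (List.getElem_mem hm))

-- for k ≤ 1 the window has a single char and A copies the string unchanged
theorem pvALoop_trivial (k : Int) (hk : k ≤ 1) :
    ∀ (s : List Char) acc, pvALoop s k acc = acc ++ s := by
  intro s
  induction s with
  | nil => intro acc; rw [pvALoop]; simp
  | cons a t ih =>
    intro acc
    rw [pvALoop]
    rw [dif_neg (by simp)]
    have hj : pvAInner (a :: t) k 0 1 = 0 := by
      rw [pvAInner]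
      rw [dif_neg (by intro hh; omega)]
    simp only [hj]
    have h1 : PySem.List.slice (a :: t) none (some ((0 : Nat) : Int)) = [] := by
      rw [PySem.List.slice_to_natCast]; simp
    have h2 : PySem.List.slice (a :: t) (some (((0 : Nat) : Int) + 1)) none = t := by
      rw [PySem.List.slice_from _ (by omega)]; simp
    have h3 : PySem.List.pyGetD (a :: t) ((0 : Nat) : Int) ' ' = a := by
      simp
    rw [h1, h2, h3, List.nil_append, ih]
    simp

-- main invariant: A's remaining string is some window ws followed by the unread
-- suffix of s, and B's histogram counts exactly ws; both loops emit the same chars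
theorem pv_main (s : List Char) (k : Int) (hk : 1 ≤ k) (hschars : ∀ x ∈ s, x.toNat < 128) :
    ∀ (m : Nat) (rem : List Char) (counts : List Int) (p : Nat) (acc : List Char) (ws : List Char),
      rem.length = m →
      rem = ws ++ s.drop p →
      (∀ x ∈ ws, x.toNat < 128) →
      ws.length = min k.toNat rem.length →
      pvCounts counts ws →
      p ≤ s.length →
      pvALoop rem k acc = (pvStepN s s.length m (counts, p, acc)).2.2 := by
  intro m
  induction m with
  | zero =>
    intro rem counts p acc ws hlen _ _ _ _ _
    have hnil : rem = [] := List.eq_nil_of_length_eq_zero hlen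
    subst hnil
    rw [pvALoop]
    simp [pvStepN]
  | succ m ih =>
    intro rem counts p acc ws hlen hspl hwchars hwlen hcounts hpn
    have hrem_ne : rem ≠ [] := by intro hh; rw [hh] at hlen; simp at hlen
    set j := pvAInner rem k 0 1 with hjdef
    have hspec := pvAInner_spec rem k 1 0 (by omega) (by omega) (by omega)
      (by intro t ht; have : t = 0 := by omega
          subst this; exact le_refl _)
    obtain ⟨hjk, hjlen, hjmin⟩ := hspec
    have hwle : ws.length ≤ rem.length := by omega
    have hjws : j < ws.length := by omega
    have hg1 : rem.getD j ' ' = ws[j] := by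
      rw [hspl, List.getD_append _ _ _ _ hjws, List.getD_eq_getElem _ _ hjws]
    have hmemj : ws[j] ∈ ws := List.getElem_mem hjws
    have hmin : ∀ x ∈ ws, ws[j] ≤ x := by
      intro x hx
      obtain ⟨t, htl, rfl⟩ := List.mem_iff_getElem.mp hx
      have h1 := hjmin t (by omega) (by omega)
      have hg2 : rem.getD t ' ' = ws[t] := by
        rw [hspl, List.getD_append _ _ _ _ htl, List.getD_eq_getElem _ _ htl]
      rw [hg1, hg2] at h1
      exact h1
    have hcfind : pvBFind counts 0 = (ws[j]).toNat :=
      pvBFind_min counts ws ws[j] hcounts hmemj hmin hwchars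
    -- A's update of the remaining string
    have hsl1 : PySem.List.slice rem none (some ((j : Nat) : Int)) = rem.take j :=
      PySem.List.slice_to_natCast rem j
    have hsl2 : PySem.List.slice rem (some (((j : Nat) : Int) + 1)) none = rem.drop (j + 1) := by
      rw [PySem.List.slice_from rem (by omega)]
      have htn : (((j : Nat) : Int) + 1).toNat = j + 1 := by omega
      rw [htn]
    have herase : rem.take j ++ rem.drop (j + 1) = ws.eraseIdx j ++ s.drop p := by
      rw [← List.eraseIdx_eq_take_drop_succ, hspl, List.eraseIdx_append_of_lt_length hjws]
    have hchar : PySem.List.pyGetD rem ((j : Nat) : Int) ' ' = ws[j] := by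
      rw [PySem.List.pyGetD_natCast]
      exact hg1
    have hlrem : rem.length = ws.length + (s.length - p) := by
      rw [hspl]; simp
    rw [pvALoop]
    simp only [dif_neg hrem_ne, ← hjdef, hsl1, hsl2, hchar, herase]
    have hstep : pvStepN s s.length (m + 1) (counts, p, acc) =
        pvStepN s s.length m (pvBStep s s.length (counts, p, acc)) := rfl
    rw [hstep]
    by_cases hp : p < s.length
    · -- window refilled with s[p]
      have hbstep : pvBStep s s.length (counts, p, acc) =
          ((counts.set (ws[j]).toNat (counts.getD (ws[j]).toNat 0 - 1)).set (s[p]).toNat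
             ((counts.set (ws[j]).toNat (counts.getD (ws[j]).toNat 0 - 1)).getD (s[p]).toNat 0 + 1),
           p + 1, acc ++ [ws[j]]) := by
        simp only [pvBStep, hcfind, PySem.List.pySetD_natCast, PySem.List.pyGetD_natCast]
        rw [if_pos hp]
        rw [List.getD_eq_getElem s ' ' hp, Char.ofNat_toNat]
      rw [hbstep]
      have hdrop : s.drop p = s[p] :: s.drop (p + 1) := List.drop_eq_getElem_cons hp
      have hwK : ws.length = k.toNat := by omega
      refine ih (ws.eraseIdx j ++ s.drop p) _ (p + 1) (acc ++ [ws[j]]) (ws.eraseIdx j ++ [s[p]])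
        ?_ ?_ ?_ ?_ ?_ (by omega)
      · simp [List.length_eraseIdx_of_lt hjws]
        omega
      · rw [hdrop, List.append_assoc]
        rfl
      · intro x hx
        rcases List.mem_append.mp hx with hx1 | hx2
        · exact hwchars _ (List.mem_of_mem_eraseIdx hx1)
        · simp at hx2
          subst hx2
          exact hschars _ (List.getElem_mem hp)
      · simp [List.length_eraseIdx_of_lt hjws]
        omega
      · have hdec := pvCounts_dec counts ws j hcounts hjws (hwchars _ hmemj)
        exact pvCounts_inc _ _ _ hdec (hschars _ (List.getElem_mem hp))
    · -- suffix exhausted: the window only shrinks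
      have hpe : p = s.length := by omega
      have hdropnil : s.drop p = [] := by
        rw [List.drop_eq_nil_iff]
        omega
      have hbstep : pvBStep s s.length (counts, p, acc) =
          (counts.set (ws[j]).toNat (counts.getD (ws[j]).toNat 0 - 1), p, acc ++ [ws[j]]) := by
        simp only [pvBStep, hcfind, PySem.List.pySetD_natCast, PySem.List.pyGetD_natCast]
        rw [if_neg hp, Char.ofNat_toNat]
      rw [hbstep]
      refine ih (ws.eraseIdx j ++ s.drop p) _ p (acc ++ [ws[j]]) (ws.eraseIdx j)
        ?_ ?_ ?_ ?_ ?_ (by omega)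
      · simp [List.length_eraseIdx_of_lt hjws, hdropnil]
        omega
      · rfl
      · exact fun x hx => hwchars _ (List.mem_of_mem_eraseIdx hx)
      · simp [List.length_eraseIdx_of_lt hjws, hdropnil]
        omega
      · exact pvCounts_dec counts ws j hcounts hjws (hwchars _ hmemj)

-- ===== VERDICT (by name: the statement is the Claim_ definition above) =====
theorem smallestString_spec : Claim_equal_smallestString := by
  unfold Claim_equal_smallestString
  intro str k hdom
  unfold Spec_smallestString
  have hchars : ∀ x ∈ str.toList, x.toNat < 128 := by
    intro x hx
    unfold Dom_smallestString pvDomStr pvDomChar at hdom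
    simp [List.all_eq_true] at hdom
    have := hdom.1 x hx
    omega
  by_cases hk : k ≤ 0
  · unfold smallestString smallestString_alt
    rw [if_pos hk, pvALoop_trivial k (by omega)]
    simp [String.ofList_toList]
  · have hk1 : 1 ≤ k := by omega
    unfold smallestString smallestString_alt
    rw [if_neg hk]
    simp only [pv_foldl_stepN, List.length_range]
    congr 1
    have hwle : (if k < (str.toList.length : Int) then k.toNat else str.toList.length)
        ≤ str.toList.length := by split_ifs <;> omega
    refine (pv_main str.toList k hk1 hchars str.toList.length str.toList _ _ []
      (str.toList.take (if k < (str.toList.length : Int) then k.toNat else str.toList.length))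
      rfl ?_ ?_ ?_ ?_ hwle)
    · rw [List.take_append_drop]
    · exact fun x hx => hchars _ (List.mem_of_mem_take hx)
    · rw [List.length_take]
      split_ifs <;> omega
    · exact pvCounts_init str.toList hchars _ hwle
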